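-- pv_equiv track=rewrite | github.com/Lecrut/Diffusion-code-generation | data/code/13_11_7.py | scale_time_differences
-- ===== SOURCE A (Python) =====
-- def scale_time_differences(time_difference_strings):
--     total_seconds = 0
--     for time_str in time_difference_strings:
--         try:
--             if 'days' in time_str.lower():
--                 parts = time_str.split(' ')
--                 if len(parts) >= 2:
--                     days = int(parts[0])
--                     hours = int(parts[1]) if len(parts) > 1 else 0
--                     minutes = int(parts[2]) if len(parts) > 2 else 0
--                     seconds = int(parts[3]) if len(parts) > 3 else 0
--                     total_seconds += (days * 86400) + (hours * 3600) + (minutes * 60) + seconds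
--             elif 'hours' in time_str.lower():
--                 parts = time_str.split(' ')
--                 if len(parts) >= 2:
--                     hours = int(parts[0])
--                     minutes = int(parts[1]) if len(parts) > 1 else 0
--                     seconds = int(parts[2]) if len(parts) > 2 else 0
--                     total_seconds += (hours * 3600) + (minutes * 60) + seconds
--             elif 'minutes' in time_str.lower():
--                 parts = time_str.split(' ')
--                 if len(parts) >= 2:
--                     minutes = int(parts[0])
--                     seconds = int(parts[1]) if len(parts) > 1 else 0
--                     total_seconds += (minutes * 60) + seconds
--             elif 'seconds' in time_str.lower():
--                 try:
--                     total_seconds += int(time_str)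
--                 except ValueError:
--                     pass
--         except Exception:
--             continue
--     total_seconds = int(total_seconds)
--     days = total_seconds // 86400
--     remaining_seconds = total_seconds % 86400
--     hours = remaining_seconds // 3600
--     remaining_seconds %= 3600
--     minutes = remaining_seconds // 60
--     seconds = remaining_seconds % 60
--     return {
--         "days": days,
--         "hours": hours,
--         "minutes": minutes,
--         "seconds": seconds
--     }
-- ===== SOURCE B (Python) =====
-- def _radices(low):
--     # which mixed-radix scale applies, in the same priority order
--     if 'days' in low:
--         return (24, 60, 60)
--     if 'hours' in low:
--         return (60, 60)
--     if 'minutes' in low: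
--         return (60,)
--     return None
--
--
-- def _horner(val, parts, radices):
--     # mixed-radix Horner evaluation: fold the available parts in,
--     # then shift by the unused radices (missing low-order parts are 0)
--     if not radices:
--         return val
--     if not parts:
--         for r in radices:
--             val *= r
--         return val
--     return _horner(val * radices[0] + int(parts[0]), parts[1:], radices[1:])
--
--
-- def _entry(time_str):
--     low = time_str.lower()
--     radices = _radices(low)
--     if radices is not None:
--         parts = time_str.split(' ')
--         if len(parts) < 2:
--             return 0
--         try:
--             return _horner(int(parts[0]), parts[1:], radices)
--         except ValueError:
--             return 0
--     if 'seconds' in low: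
--         try:
--             return int(time_str)
--         except ValueError:
--             return 0
--     return 0
--
--
-- def scale_time_differences(time_difference_strings):
--     total = sum(_entry(s) for s in time_difference_strings)
--     return {
--         "days": total // 86400,
--         "hours": total // 3600 % 24,
--         "minutes": total // 60 % 60,
--         "seconds": total % 60,
--     }
-- ===== Notes on version B (the rewrite author's own statement) =====
-- stated objective: alternative
-- what changed: Per entry, B evaluates the parts as one mixed-radix number via a recursive Horner fold (val = val*radix + int(part), padding missing low-order parts by shifting) instead of A's four unrolled sum-of-multiplier branches, and computes the output fields by independent closed-form //-and-% expressions (total//3600 % 24, ...) instead of A's cascaded remainder divmods.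
import Mathlib
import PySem

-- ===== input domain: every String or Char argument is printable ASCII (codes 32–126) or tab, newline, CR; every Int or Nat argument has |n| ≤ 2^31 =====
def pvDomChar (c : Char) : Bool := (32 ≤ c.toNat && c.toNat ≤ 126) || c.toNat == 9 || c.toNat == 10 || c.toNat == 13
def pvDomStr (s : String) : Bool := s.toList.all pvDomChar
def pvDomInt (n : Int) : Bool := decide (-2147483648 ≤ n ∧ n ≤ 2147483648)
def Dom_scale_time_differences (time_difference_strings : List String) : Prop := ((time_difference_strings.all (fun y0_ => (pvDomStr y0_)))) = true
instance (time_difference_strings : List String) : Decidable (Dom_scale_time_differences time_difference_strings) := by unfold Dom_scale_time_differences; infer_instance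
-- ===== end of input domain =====

-- B factors A's four copied branches into one mixed-radix Horner recursion and replaces the
-- divmod cascade by independent //- and %-formulas (objective: alternative).


-- ===== PORT A =====
-- one iteration of A's for-loop; the try/except means any failed int() skips the whole entry.
-- time_str.split(' ') is PySem.Str.split? with the nonempty literal sep " " (always some; .getD [] unwraps).
def pvA_step (total : Int) (time_str : String) : Int :=
  if PySem.Str.isIn "days" (PySem.Str.lower time_str) then
    match (PySem.Str.split? time_str " ").getD [] with
    | p0 :: p1 :: rest =>
      match PySem.Int.ofStr? p0, PySem.Int.ofStr? p1,
            (if rest.length > 0 then PySem.Int.ofStr? (rest.getD 0 "") else some 0),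
            (if rest.length > 1 then PySem.Int.ofStr? (rest.getD 1 "") else some 0) with
      | some d, some h, some m, some sec => total + (d * 86400 + h * 3600 + m * 60 + sec)
      | _, _, _, _ => total
    | _ => total
  else if PySem.Str.isIn "hours" (PySem.Str.lower time_str) then
    match (PySem.Str.split? time_str " ").getD [] with
    | p0 :: p1 :: rest =>
      match PySem.Int.ofStr? p0, PySem.Int.ofStr? p1,
            (if rest.length > 0 then PySem.Int.ofStr? (rest.getD 0 "") else some 0) with
      | some h, some m, some sec => total + (h * 3600 + m * 60 + sec)
      | _, _, _ => total
    | _ => total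
  else if PySem.Str.isIn "minutes" (PySem.Str.lower time_str) then
    match (PySem.Str.split? time_str " ").getD [] with
    | p0 :: p1 :: _ =>
      match PySem.Int.ofStr? p0, PySem.Int.ofStr? p1 with
      | some m, some sec => total + (m * 60 + sec)
      | _, _ => total
    | _ => total
  else if PySem.Str.isIn "seconds" (PySem.Str.lower time_str) then
    match PySem.Int.ofStr? time_str with
    | some v => total + v
    | none => total
  else total

def scale_time_differences (time_difference_strings : List String) : List (String × Int) :=
  let total_seconds := time_difference_strings.foldl pvA_step 0
  let days := PySem.Int.floordiv total_seconds 86400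
  let r1 := PySem.Int.mod total_seconds 86400
  let hours := PySem.Int.floordiv r1 3600
  let r2 := PySem.Int.mod r1 3600
  let minutes := PySem.Int.floordiv r2 60
  let seconds := PySem.Int.mod r2 60
  [("days", days), ("hours", hours), ("minutes", minutes), ("seconds", seconds)]

-- ===== PORT B =====
-- which mixed-radix scale applies, in the same priority order (Source B's _radices)
def pvRadices (low : String) : Option (List Int) :=
  if PySem.Str.isIn "days" low then some [24, 60, 60]
  else if PySem.Str.isIn "hours" low then some [60, 60]
  else if PySem.Str.isIn "minutes" low then some [60]
  else none

-- Source B's _horner; a failing int() is a none that propagates (the caller's try/except)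
def pvHorner? : Int → List String → List Int → Option Int
  | val, _, [] => some val
  | val, [], radices => some (radices.foldl (· * ·) val)
  | val, p :: ps, r :: rs => (PySem.Int.ofStr? p).bind fun x => pvHorner? (val * r + x) ps rs

-- Source B's _entry
def pvEntry (time_str : String) : Int :=
  let low := PySem.Str.lower time_str
  match pvRadices low with
  | some radices =>
      match (PySem.Str.split? time_str " ").getD [] with
      | p0 :: p1 :: rest =>
          ((PySem.Int.ofStr? p0).bind fun v => pvHorner? v (p1 :: rest) radices).getD 0
      | _ => 0
  | none =>
      if PySem.Str.isIn "seconds" low then (PySem.Int.ofStr? time_str).getD 0 else 0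

def scale_time_differences_alt (time_difference_strings : List String) : List (String × Int) :=
  let total := (time_difference_strings.map pvEntry).sum
  [("days", PySem.Int.floordiv total 86400),
   ("hours", PySem.Int.mod (PySem.Int.floordiv total 3600) 24),
   ("minutes", PySem.Int.mod (PySem.Int.floordiv total 60) 60),
   ("seconds", PySem.Int.mod total 60)]

-- ===== PRECONDITION & SPEC =====
def Spec_scale_time_differences (time_difference_strings : List String) (out : List (String × Int)) : Prop := out = scale_time_differences_alt time_difference_strings
instance (time_difference_strings : List String) (out : List (String × Int)) : Decidable (Spec_scale_time_differences time_difference_strings out) := by unfold Spec_scale_time_differences; infer_instance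

-- ===== CLAIM =====
def Claim_equal_scale_time_differences : Prop := ∀ (time_difference_strings : List String), Dom_scale_time_differences time_difference_strings → Spec_scale_time_differences time_difference_strings (scale_time_differences time_difference_strings)

-- ===== LEMMAS AND PROOFS =====
theorem pvStep_eq (t : Int) (s : String) : pvA_step t s = t + pvEntry s := by
  unfold pvA_step pvEntry pvRadices
  by_cases hd : PySem.Str.isIn "days" (PySem.Str.lower s) = true
  · simp only [hd, if_true]
    rcases h : (PySem.Str.split? s " ").getD [] with _ | ⟨p0, _ | ⟨p1, _ | ⟨p2, _ | ⟨p3, rest⟩⟩⟩⟩ <;>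
      try simp
    · cases h0 : PySem.Int.ofStr? p0 <;> cases h1 : PySem.Int.ofStr? p1 <;>
        simp [pvHorner?, h0, h1] <;> ring
    · cases h0 : PySem.Int.ofStr? p0 <;> cases h1 : PySem.Int.ofStr? p1 <;>
        cases h2 : PySem.Int.ofStr? p2 <;> simp [pvHorner?, h0, h1, h2] <;> ring
    · cases h0 : PySem.Int.ofStr? p0 <;> cases h1 : PySem.Int.ofStr? p1 <;>
        cases h2 : PySem.Int.ofStr? p2 <;> cases h3 : PySem.Int.ofStr? p3 <;>
        simp [pvHorner?, h0, h1, h2, h3] <;> ring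
  · by_cases hh : PySem.Str.isIn "hours" (PySem.Str.lower s) = true
    · simp only [hd, hh, if_true, if_false, Bool.false_eq_true]
      rcases h : (PySem.Str.split? s " ").getD [] with _ | ⟨p0, _ | ⟨p1, _ | ⟨p2, rest⟩⟩⟩ <;>
        try simp
      · cases h0 : PySem.Int.ofStr? p0 <;> cases h1 : PySem.Int.ofStr? p1 <;>
          simp [pvHorner?, h0, h1] <;> ring
      · cases h0 : PySem.Int.ofStr? p0 <;> cases h1 : PySem.Int.ofStr? p1 <;>
          cases h2 : PySem.Int.ofStr? p2 <;> simp [pvHorner?, h0, h1, h2] <;> ring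
    · by_cases hm : PySem.Str.isIn "minutes" (PySem.Str.lower s) = true
      · simp only [hd, hh, hm, if_true, if_false, Bool.false_eq_true]
        rcases h : (PySem.Str.split? s " ").getD [] with _ | ⟨p0, _ | ⟨p1, rest⟩⟩ <;> try simp
        cases h0 : PySem.Int.ofStr? p0 <;> cases h1 : PySem.Int.ofStr? p1 <;>
          simp [pvHorner?, h0, h1] <;> ring
      · by_cases hs : PySem.Str.isIn "seconds" (PySem.Str.lower s) = true <;>
          simp only [hd, hh, hm, hs, if_true, if_false, Bool.false_eq_true] <;>
        [cases hv : PySem.Int.ofStr? s <;> simp [hv]; simp]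

theorem pvFold_eq (xs : List String) : ∀ t : Int,
    xs.foldl pvA_step t = t + (xs.map pvEntry).sum := by
  induction xs with
  | nil => simp
  | cons x xs ih =>
      intro t
      simp only [List.foldl_cons, List.map_cons, List.sum_cons, ih, pvStep_eq]
      ring

-- ===== VERDICT =====
theorem scale_time_differences_spec : Claim_equal_scale_time_differences := by
  intro xs _
  unfold Spec_scale_time_differences scale_time_differences scale_time_differences_alt
  have h := pvFold_eq xs 0
  simp only [h, Int.zero_add]
  set t := (xs.map pvEntry).sum with ht
  rw [PySem.Int.floordiv_eq_ediv_of_pos (by norm_num : (0:Int) < 86400),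
      PySem.Int.mod_eq_emod_of_pos (a := t) (by norm_num : (0:Int) < 86400),
      PySem.Int.floordiv_eq_ediv_of_pos (by norm_num : (0:Int) < 3600),
      PySem.Int.mod_eq_emod_of_pos (by norm_num : (0:Int) < 3600),
      PySem.Int.floordiv_eq_ediv_of_pos (by norm_num : (0:Int) < 60),
      PySem.Int.mod_eq_emod_of_pos (by norm_num : (0:Int) < 60),
      PySem.Int.floordiv_eq_ediv_of_pos (by norm_num : (0:Int) < 3600),
      PySem.Int.mod_eq_emod_of_pos (by norm_num : (0:Int) < 24),
      PySem.Int.floordiv_eq_ediv_of_pos (by norm_num : (0:Int) < 60),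
      PySem.Int.mod_eq_emod_of_pos (b := 60) (by norm_num : (0:Int) < 60),
      PySem.Int.mod_eq_emod_of_pos (a := t) (by norm_num : (0:Int) < 60)]
  have h24 : t % 86400 / 3600 = t / 3600 % 24 := by omega
  have h60 : t % 86400 % 3600 / 60 = t / 60 % 60 := by omega
  have hs : t % 86400 % 3600 % 60 = t % 60 := by omega
  rw [h24, h60, hs]
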